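-- pv_equiv track=rewrite | github.com/amrut-prabhu/pos-tagger-deep-learning | buildtagger.py | get_line_data
-- ===== SOURCE A (Python) =====
-- def get_line_data(line):
--     words = []
--     tags = []
--
--     terms = line.split()
--     for term in terms:
--         splitIdx = term.rfind('/')
--         word = term[:splitIdx]
--         tag = term[splitIdx+1:]
--
--         words.append(word)
--         tags.append(tag)
--
--     return (words, tags)
-- ===== SOURCE B (Python) =====
-- def get_line_data(line):
--     words = []
--     tags = []
--     buf = ""
--     slash = -1  # index in buf of the last '/' seen in the current token
--     for c in line:
--         if c.isspace():
--             if buf: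
--                 words.append(buf[:slash])
--                 tags.append(buf[slash+1:])
--                 buf = ""
--                 slash = -1
--         else:
--             if c == '/':
--                 slash = len(buf)
--             buf += c
--     if buf:
--         words.append(buf[:slash])
--         tags.append(buf[slash+1:])
--     return (words, tags)
-- ===== Notes on version B (the rewrite author's own statement) =====
-- stated objective: alternative
-- what changed: B replaces A's split()-then-rfind-per-token design by a single character-level state machine over the raw line that builds tokens and tracks the index of the last '/' incrementally, emitting each (word, tag) at token boundaries.
import Mathlib
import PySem

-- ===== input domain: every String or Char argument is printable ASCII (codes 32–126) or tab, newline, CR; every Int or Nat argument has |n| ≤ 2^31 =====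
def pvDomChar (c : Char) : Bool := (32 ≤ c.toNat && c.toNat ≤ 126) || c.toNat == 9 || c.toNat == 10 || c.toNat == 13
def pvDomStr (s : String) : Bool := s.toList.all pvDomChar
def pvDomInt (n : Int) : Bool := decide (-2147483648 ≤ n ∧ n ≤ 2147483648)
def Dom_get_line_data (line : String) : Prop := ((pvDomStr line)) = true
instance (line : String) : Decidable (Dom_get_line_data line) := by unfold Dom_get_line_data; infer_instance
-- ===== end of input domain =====

-- B replaces A's split-then-rfind-per-token passes by a single character-level state machine over the raw string that tracks the last-slash index of the current token; alternative decomposition, same cost.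


-- ===== PORT A =====
def get_line_data (line : String) : List String × List String :=
  let terms := PySem.Str.split₀ line
  let st := terms.foldl (fun (acc : List String × List String) term =>
    let splitIdx := PySem.Str.rfind term "/"
    let word := PySem.Str.slice term none (some splitIdx)
    let tag := PySem.Str.slice term (some (splitIdx + 1)) none
    (acc.1 ++ [word], acc.2 ++ [tag])) ([], [])
  (st.1, st.2)

-- ===== PORT B =====
-- one left-to-right scan of the characters; state: the two result lists, the current
-- token buffer `buf`, and `slash` = index in `buf` of the last '/' seen (-1 if none)
def pvScan : List Char → List String → List String → String → Int → List String × List String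
  | [], words, tags, buf, slash =>
      if buf = "" then (words, tags)
      else (words ++ [PySem.Str.slice buf none (some slash)],
            tags ++ [PySem.Str.slice buf (some (slash + 1)) none])
  | c :: cs, words, tags, buf, slash =>
      if PySem.Chars.isspace c then
        if buf = "" then pvScan cs words tags buf slash
        else pvScan cs (words ++ [PySem.Str.slice buf none (some slash)])
                      (tags ++ [PySem.Str.slice buf (some (slash + 1)) none]) "" (-1)
      else
        pvScan cs words tags (buf.push c)
          (if c = '/' then (PySem.Str.len buf : Int) else slash)

def get_line_data_alt (line : String) : List String × List String :=
  pvScan line.toList [] [] "" (-1)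

-- ===== PRECONDITION & SPEC =====
def Spec_get_line_data (line : String) (out : List String × List String) : Prop := out = get_line_data_alt line
instance (line : String) (out : List String × List String) : Decidable (Spec_get_line_data line out) := by unfold Spec_get_line_data; infer_instance

-- ===== CLAIM =====
def Claim_equal_get_line_data : Prop := ∀ (line : String), Dom_get_line_data line → Spec_get_line_data line (get_line_data line)

-- ===== LEMMAS AND PROOFS =====

-- the token list produced by Python's split(), phrased forward (cur is the pending buffer)
def pvToks : List Char → List Char → List (List Char)
  | [], cur => if cur = [] then [] else [cur]
  | c :: cs, cur =>
      if PySem.Chars.isspace c then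
        if cur = [] then pvToks cs [] else cur :: pvToks cs []
      else pvToks cs (cur ++ [c])

theorem pvSplitGo_eq_toks (cs : List Char) : ∀ (rbuf : List Char) (acc : List (List Char)),
    PySem.Chars.split₀.go cs rbuf acc = acc.reverse ++ pvToks cs rbuf.reverse := by
  induction cs with
  | nil =>
      intro rbuf acc
      unfold PySem.Chars.split₀.go pvToks
      by_cases h : rbuf = [] <;> simp [h]
  | cons c cs ih =>
      intro rbuf acc
      unfold PySem.Chars.split₀.go
      by_cases hs : PySem.Chars.isspace c
      · by_cases h : rbuf = [] <;> simp [hs, h, ih, pvToks]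
      · simpa [hs, pvToks] using ih (c :: rbuf) acc

theorem pvSplit₀_eq_toks (s : List Char) : PySem.Chars.split₀ s = pvToks s [] := by
  simpa using pvSplitGo_eq_toks s [] []

theorem pvPrefixOf_slash_append (l : List Char) (c : Char) (hc : c ≠ '/') :
    ['/'].isPrefixOf (l ++ [c]) = ['/'].isPrefixOf l := by
  cases l with
  | nil => simp [List.isPrefixOf]; exact fun h => hc h.symm
  | cons x xs => simp [List.isPrefixOf]

theorem pvGo_succ (s sub : List Char) (j : Nat) :
    PySem.Chars.rfind.go s sub (j + 1)
      = if sub.isPrefixOf (List.drop (j + 1) s) then ((j : Int) + 1) else PySem.Chars.rfind.go s sub j := rfl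

theorem pvGo_zero (s sub : List Char) :
    PySem.Chars.rfind.go s sub 0 = if sub.isPrefixOf s then 0 else -1 := rfl

theorem pvRfindGo_append (t : List Char) (c : Char) (hc : c ≠ '/') :
    ∀ j, j ≤ t.length →
      PySem.Chars.rfind.go (t ++ [c]) ['/'] j = PySem.Chars.rfind.go t ['/'] j := by
  intro j
  induction j with
  | zero =>
      intro _
      rw [pvGo_zero, pvGo_zero, pvPrefixOf_slash_append t c hc]
  | succ j ih =>
      intro hj
      rw [pvGo_succ, pvGo_succ,
          show List.drop (j+1) (t ++ [c]) = List.drop (j+1) t ++ [c] from List.drop_append_of_le_length hj,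
          pvPrefixOf_slash_append _ c hc, ih (Nat.le_of_succ_le hj)]

theorem pvGo_at_end (t : List Char) :
    PySem.Chars.rfind.go (t ++ ['/']) ['/'] t.length = (t.length : Int) := by
  cases h : t.length with
  | zero =>
      have ht : t = [] := List.eq_nil_of_length_eq_zero h
      subst ht
      rw [pvGo_zero]
      simp [List.isPrefixOf]
  | succ j =>
      have hd : List.drop (j + 1) (t ++ ['/']) = ['/'] := by rw [← h]; simp
      rw [pvGo_succ, hd]
      simp [List.isPrefixOf]

theorem pvRfind_append (t : List Char) (c : Char) :
    PySem.Chars.rfind (t ++ [c]) ['/'] = if c = '/' then (t.length : Int) else PySem.Chars.rfind t ['/'] := by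
  unfold PySem.Chars.rfind
  rw [show (t ++ [c]).length = t.length + 1 by simp, pvGo_succ,
      show List.drop (t.length + 1) (t ++ [c]) = [] by simp,
      show (['/'].isPrefixOf ([] : List Char)) = false from rfl]
  simp only [Bool.false_eq_true, if_false]
  by_cases hc : c = '/'
  · subst hc
    rw [if_pos rfl]
    exact pvGo_at_end t
  · rw [if_neg hc]
    exact pvRfindGo_append t c hc t.length (Nat.le_refl _)

theorem pvRfind_nil : PySem.Chars.rfind [] ['/'] = -1 := by decide

-- emitted word and tag of one token
def pvWf (t : List Char) : String :=
  PySem.Str.slice (String.ofList t) none (some (PySem.Chars.rfind t ['/']))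
def pvTf (t : List Char) : String :=
  PySem.Str.slice (String.ofList t) (some (PySem.Chars.rfind t ['/'] + 1)) none


theorem pvScan_eq (cs : List Char) : ∀ (ws ts : List String) (buf : String),
    pvScan cs ws ts buf (PySem.Chars.rfind buf.toList ['/']) =
      (ws ++ (pvToks cs buf.toList).map pvWf, ts ++ (pvToks cs buf.toList).map pvTf) := by
  induction cs with
  | nil =>
      intro ws ts buf
      unfold pvScan pvToks
      by_cases h : buf = ""
      · simp [h]
      · simp [h, String.toList_eq_nil_iff.not.mpr h, pvWf, pvTf, String.ofList_toList]
  | cons c cs ih =>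
      intro ws ts buf
      unfold pvScan
      by_cases hs : PySem.Chars.isspace c
      · by_cases h : buf = ""
        · subst h
          simpa [hs, pvToks] using ih ws ts ""
        · have := ih (ws ++ [PySem.Str.slice buf none (some (PySem.Chars.rfind buf.toList ['/']))])
            (ts ++ [PySem.Str.slice buf (some (PySem.Chars.rfind buf.toList ['/'] + 1)) none]) ""
          simp only [String.toList_empty, pvRfind_nil] at this ⊢
          rw [if_pos hs, if_neg h, this]
          simp [pvToks, hs, String.toList_eq_nil_iff.not.mpr h, pvWf, pvTf, String.ofList_toList]
      · have hlen : (if c = '/' then (PySem.Str.len buf : Int) else PySem.Chars.rfind buf.toList ['/'])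
            = PySem.Chars.rfind (buf.push c).toList ['/'] := by
          rw [String.toList_push, pvRfind_append]
          simp [PySem.Str.len_eq]
        rw [if_neg hs, hlen, ih ws ts (buf.push c)]
        simp [pvToks, hs, String.toList_push]

-- A's fold over terms is the pair of maps
theorem pvFold_eq_maps (l : List String) :
    (l.foldl (fun (acc : List String × List String) term =>
      (acc.1 ++ [PySem.Str.slice term none (some (PySem.Str.rfind term "/"))],
       acc.2 ++ [PySem.Str.slice term (some (PySem.Str.rfind term "/" + 1)) none])) ([], []))
    = (l.map (fun term => PySem.Str.slice term none (some (PySem.Str.rfind term "/"))),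
       l.map (fun term => PySem.Str.slice term (some (PySem.Str.rfind term "/" + 1)) none)) := by
  exact (PySem.List.foldl_prod_mk
      (fun (w : List String) term => w ++ [PySem.Str.slice term none (some (PySem.Str.rfind term "/"))])
      (fun (tg : List String) term => tg ++ [PySem.Str.slice term (some (PySem.Str.rfind term "/" + 1)) none])
      l [] []).trans (by simp [← List.flatMap_def, ← List.map_eq_flatMap])

-- ===== VERDICT =====
theorem get_line_data_spec : Claim_equal_get_line_data := by
  intro line _
  unfold Spec_get_line_data get_line_data get_line_data_alt
  have hscan := pvScan_eq line.toList [] [] ""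
  simp only [String.toList_empty, pvRfind_nil, List.nil_append] at hscan
  rw [hscan]
  show ((List.foldl (fun (acc : List String × List String) term =>
      (acc.1 ++ [PySem.Str.slice term none (some (PySem.Str.rfind term "/"))],
       acc.2 ++ [PySem.Str.slice term (some (PySem.Str.rfind term "/" + 1)) none])) ([], []) (PySem.Str.split₀ line)).1,
     (List.foldl (fun (acc : List String × List String) term =>
      (acc.1 ++ [PySem.Str.slice term none (some (PySem.Str.rfind term "/"))],
       acc.2 ++ [PySem.Str.slice term (some (PySem.Str.rfind term "/" + 1)) none])) ([], []) (PySem.Str.split₀ line)).2)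
    = (List.map pvWf (pvToks line.toList []), List.map pvTf (pvToks line.toList []))
  rw [pvFold_eq_maps]
  have hsplit : PySem.Str.split₀ line = (pvToks line.toList []).map String.ofList := by
    rw [PySem.Str.split₀, pvSplit₀_eq_toks]
  rw [hsplit]
  simp [List.map_map, Function.comp, pvWf, pvTf, PySem.Str.rfind_eq, String.toList_ofList]
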